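-- pv_equiv track=rewrite | github.com/savsher/freecell | run.py | fit_together
-- ===== SOURCE A (Python) =====
-- mn = 13
--
-- KINGS = [i for i in range(1, 53) if i % mn == 13]
--
-- def fit_two(card, card2):
--     """ Check two cards for compability """
--     if card in KINGS:
--         return False
--     suit = (card-1)//mn
--     fit_suit = ((suit+1)%4, (suit+3)%4)
--     fit_cards = [i for i in range(1, 53) if (i % mn == (card+1) % mn) and ((i-1)//mn in fit_suit)]
--     if card2 in fit_cards:
--         return True
--     return False
--
-- def fit_together(cards):
--     x = len(cards)-1
--     if x == 0:
--         return False
--     while x > 0: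
--         if fit_two(cards[x], cards[x-1]):
--             x -= 1
--         else:
--             return False
--     return True
-- ===== SOURCE B (Python) =====
-- def fit_together(cards):
--     # Global-invariant characterization: a fitting chain shifts rank down by one and
--     # alternates suit color at each step, so rank+index (mod 13) and suit-parity+index
--     # (mod 2) must each be constant across the whole list, with all but the last card
--     # inside 1..52.
--     if len(cards) == 1:
--         return False
--     if not all(1 <= c <= 52 for c in cards[:-1]):
--         return False
--     ranks = set((c + i) % 13 for i, c in enumerate(cards))
--     colors = set(((c - 1) // 13 + i) % 2 for i, c in enumerate(cards))
--     return len(ranks) <= 1 and len(colors) <= 1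
-- ===== Notes on version B (the rewrite author's own statement) =====
-- stated objective: alternative
-- what changed: Replaced A's per-pair fitting test (building a 52-card candidate list for each adjacent pair plus a dead empty-KINGS check, in an index-counting while loop) by a global-invariant characterization: all but the last card lie in 1..52, rank+index is constant mod 13, and suit-parity+index is constant mod 2, each checked as a one-element set.
import Mathlib
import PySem

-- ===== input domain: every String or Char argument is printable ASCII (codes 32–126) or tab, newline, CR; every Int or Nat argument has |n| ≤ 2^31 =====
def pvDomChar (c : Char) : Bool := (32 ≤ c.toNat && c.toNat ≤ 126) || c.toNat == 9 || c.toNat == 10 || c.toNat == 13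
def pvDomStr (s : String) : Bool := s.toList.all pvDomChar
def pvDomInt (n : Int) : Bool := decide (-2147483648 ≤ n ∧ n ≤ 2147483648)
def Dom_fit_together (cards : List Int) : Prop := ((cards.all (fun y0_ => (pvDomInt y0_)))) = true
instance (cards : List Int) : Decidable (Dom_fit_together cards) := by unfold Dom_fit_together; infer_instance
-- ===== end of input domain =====

-- B replaces A's per-pair candidate-list fitting test with a global-invariant check
-- (rank+index constant mod 13, suit-parity+index constant mod 2, interior cards in 1..52) ("alternative").


-- ===== PORT A =====
def KINGS : List Int :=
  (PySem.List.pyRange 1 53 1).filter (fun i => PySem.Int.mod i 13 == 13)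

def fit_two (card card2 : Int) : Bool :=
  if KINGS.contains card then false
  else
    let suit := PySem.Int.floordiv (card - 1) 13
    let fit_suit := (PySem.Int.mod (suit + 1) 4, PySem.Int.mod (suit + 3) 4)
    let fit_cards := (PySem.List.pyRange 1 53 1).filter (fun i =>
      PySem.Int.mod i 13 == PySem.Int.mod (card + 1) 13 &&
      (PySem.Int.floordiv (i - 1) 13 == fit_suit.1 || PySem.Int.floordiv (i - 1) 13 == fit_suit.2))
    if fit_cards.contains card2 then true else false

-- the while loop of A, counting x down to 0; accesses cards[x] and cards[x-1]
def fitLoop (cards : List Int) : Nat → Bool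
  | 0 => true
  | n + 1 =>
    match PySem.List.pyGet? cards ((n : Int) + 1), PySem.List.pyGet? cards (n : Int) with
    | some a, some b => if fit_two a b then fitLoop cards n else false
    | _, _ => false

def fit_together (cards : List Int) : Bool :=
  if ((cards.length : Int) - 1) == 0 then false
  else fitLoop cards (cards.length - 1)

-- ===== PORT B =====
def fit_together_alt (cards : List Int) : Bool :=
  if cards.length == 1 then false
  else if !((PySem.List.slice cards none (some (-1))).all fun c => decide (1 ≤ c) && decide (c ≤ 52)) then false
  else
    let ranks : PySem.Set Int :=
      PySem.Set.ofList ((PySem.List.enumerate cards).map fun ic => PySem.Int.mod (ic.2 + ic.1) 13)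
    let colors : PySem.Set Int :=
      PySem.Set.ofList ((PySem.List.enumerate cards).map fun ic =>
        PySem.Int.mod (PySem.Int.floordiv (ic.2 - 1) 13 + ic.1) 2)
    decide (ranks.length ≤ 1) && decide (colors.length ≤ 1)

-- ===== PRECONDITION & SPEC =====
def Spec_fit_together (cards : List Int) (out : Bool) : Prop := out = fit_together_alt cards
instance (cards : List Int) (out : Bool) : Decidable (Spec_fit_together cards out) := by unfold Spec_fit_together; infer_instance

-- ===== CLAIM (what is proved, stated in full; the proofs are below) =====
def Claim_equal_fit_together : Prop := ∀ (cards : List Int), Dom_fit_together cards → Spec_fit_together cards (fit_together cards)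

-- ===== LEMMAS AND PROOFS =====

def gIdx (cards : List Int) (i : Nat) : Int := cards.getD i 0

-- rank-plus-index and suit-parity-plus-index invariants of B
def Rf (cards : List Int) (k : Nat) : Int := (gIdx cards k + (k : Int)) % 13
def Cf (cards : List Int) (k : Nat) : Int := ((gIdx cards k - 1) / 13 + (k : Int)) % 2

lemma KINGS_nil : KINGS = [] := by decide

-- characterization of A's per-pair test
lemma fit_two_iff (a b : Int) :
    fit_two a b = true ↔
      (1 ≤ b ∧ b < 53) ∧ b % 13 = (a + 1) % 13 ∧
      ((b - 1) / 13 = ((a - 1) / 13 + 1) % 4 ∨ (b - 1) / 13 = ((a - 1) / 13 + 3) % 4) := by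
  have hmod : ∀ x : Int, PySem.Int.mod x 13 = x % 13 :=
    fun x => PySem.Int.mod_eq_emod_of_pos (by norm_num)
  have hmod4 : ∀ x : Int, PySem.Int.mod x 4 = x % 4 :=
    fun x => PySem.Int.mod_eq_emod_of_pos (by norm_num)
  have hfd : ∀ x : Int, PySem.Int.floordiv x 13 = x / 13 :=
    fun x => PySem.Int.floordiv_eq_ediv_of_pos (by norm_num)
  simp only [fit_two, KINGS_nil, List.contains_nil, Bool.false_eq_true, if_false]
  by_cases hb : b ∈ (PySem.List.pyRange 1 53 1).filter (fun i =>
      PySem.Int.mod i 13 == PySem.Int.mod (a + 1) 13 &&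
      (PySem.Int.floordiv (i - 1) 13 == PySem.Int.mod (PySem.Int.floordiv (a - 1) 13 + 1) 4 ||
       PySem.Int.floordiv (i - 1) 13 == PySem.Int.mod (PySem.Int.floordiv (a - 1) 13 + 3) 4))
  · rw [if_pos (List.contains_iff_mem.mpr hb)]
    simp only [List.mem_filter, PySem.List.mem_pyRange_one, Bool.and_eq_true, beq_iff_eq,
      Bool.or_eq_true, hmod, hmod4, hfd] at hb
    simp only [true_iff]
    exact ⟨⟨hb.1.1, hb.1.2⟩, hb.2.1, hb.2.2⟩
  · rw [if_neg (fun hc => hb (List.contains_iff_mem.mp hc))]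
    simp only [List.mem_filter, PySem.List.mem_pyRange_one, Bool.and_eq_true, beq_iff_eq,
      Bool.or_eq_true, hmod, hmod4, hfd] at hb
    simp only [Bool.false_eq_true, false_iff]
    intro ⟨h1, h2, h3⟩
    exact hb ⟨⟨h1.1, h1.2⟩, h2, h3⟩

-- shifting a rank equality by a common index
lemma rank_arith (a b i : Int) : b % 13 = (a + 1) % 13 ↔ (b + i) % 13 = (a + (i + 1)) % 13 := by
  omega

-- the two opposite-color suits are exactly the suits of flipped parity (t a suit, 0..3)
lemma parity_arith (s t i : Int) (h0 : 0 ≤ t) (h3 : t ≤ 3) :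
    (t = (s + 1) % 4 ∨ t = (s + 3) % 4) ↔ (t + i) % 2 = (s + (i + 1)) % 2 := by
  omega

-- A's loop says: every adjacent pair below index n fits
lemma fitLoop_iff (cards : List Int) :
    ∀ n : Nat, n < cards.length →
      (fitLoop cards n = true ↔ ∀ i : Nat, i < n → fit_two (gIdx cards (i + 1)) (gIdx cards i) = true) := by
  intro n
  induction n with
  | zero => intro _; simp [fitLoop]
  | succ m ih =>
    intro h
    have hm1 : m + 1 < cards.length := h
    have hm : m < cards.length := Nat.lt_of_succ_lt h
    have g1 : PySem.List.pyGet? cards ((m : Int) + 1) = some (gIdx cards (m + 1)) := by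
      rw [show ((m : Int) + 1) = ((m + 1 : Nat) : Int) by push_cast; ring,
        PySem.List.pyGet?_natCast, List.getElem?_eq_getElem hm1, gIdx,
        List.getD_eq_getElem cards 0 hm1]
    have g0 : PySem.List.pyGet? cards ((m : Int)) = some (gIdx cards m) := by
      rw [PySem.List.pyGet?_natCast, List.getElem?_eq_getElem hm, gIdx,
        List.getD_eq_getElem cards 0 hm]
    have step : fitLoop cards (m + 1) =
        (if fit_two (gIdx cards (m + 1)) (gIdx cards m) then fitLoop cards m else false) := by
      simp only [fitLoop, g1, g0]
    rw [step]
    constructor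
    · intro hl i hi
      by_cases hf : fit_two (gIdx cards (m + 1)) (gIdx cards m) = true
      · rw [if_pos hf] at hl
        rcases Nat.lt_succ_iff_lt_or_eq.mp hi with h' | h'
        · exact ((ih hm).mp hl) i h'
        · subst h'; exact hf
      · simp [hf] at hl
    · intro hall
      rw [if_pos (hall m (Nat.lt_succ_self m))]
      exact (ih hm).mpr (fun i hi => hall i (Nat.lt_succ_of_lt hi))

-- a deduplicated list has at most one element iff the source list is constant
lemma setLen_le_one_iff (l : List Int) :
    (PySem.Set.ofList l).length ≤ 1 ↔ ∀ a ∈ l, ∀ b ∈ l, a = b := by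
  constructor
  · intro h a ha b hb
    have ha' : a ∈ PySem.Set.ofList l := (PySem.Set.mem_ofList l a).mpr ha
    have hb' : b ∈ PySem.Set.ofList l := (PySem.Set.mem_ofList l b).mpr hb
    match hS : PySem.Set.ofList l with
    | [] => rw [hS] at ha'; cases ha'
    | [x] =>
      rw [hS] at ha' hb'
      simp only [List.mem_singleton] at ha' hb'
      rw [ha', hb']
    | x :: y :: t => rw [hS] at h; simp at h
  · intro h
    have hnd := PySem.Set.nodup_ofList l
    match hS : PySem.Set.ofList l with
    | [] => simp
    | [x] => simp
    | x :: y :: t =>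
      rw [hS] at hnd
      have hx : x ∈ l := (PySem.Set.mem_ofList l x).mp (by rw [hS]; simp)
      have hy : y ∈ l := (PySem.Set.mem_ofList l y).mp (by rw [hS]; simp)
      have : x = y := h x hx y hy
      simp [this] at hnd

-- all-pairs equal iff adjacent equal, for a function of the index
lemma allpairs_iff_adjacent (g : Nat → Int) (n : Nat) :
    (∀ k, k < n → ∀ l, l < n → g k = g l) ↔ (∀ i, i + 1 < n → g i = g (i + 1)) := by
  constructor
  · intro h i hi
    exact h i (by omega) (i + 1) hi
  · intro h
    have hbase : ∀ k, k < n → g k = g 0 := by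
      intro k
      induction k with
      | zero => intro _; rfl
      | succ m ihm =>
        intro hk
        rw [← h m hk]
        exact ihm (by omega)
    intro k hk l hl
    rw [hbase k hk, hbase l hl]

-- membership in B's mapped-enumerate lists, index form
lemma mem_map_enumerate_iff (cards : List Int) (f : Int × Int → Int) (x : Int) :
    x ∈ (PySem.List.enumerate cards).map (fun ic => f ic) ↔
      ∃ k : Nat, k < cards.length ∧ x = f ((k : Int), gIdx cards k) := by
  simp only [List.mem_map, PySem.List.mem_enumerate_iff]
  constructor
  · rintro ⟨p, ⟨k, hk, rfl⟩, rfl⟩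
    have hg : gIdx cards k = cards[k] := by rw [gIdx, List.getD_eq_getElem cards 0 hk]
    exact ⟨k, hk, by simp [hg]⟩
  · rintro ⟨k, hk, rfl⟩
    have hg : gIdx cards k = cards[k] := by rw [gIdx, List.getD_eq_getElem cards 0 hk]
    exact ⟨((0 : Int) + (k : Int), cards[k]), ⟨k, hk, rfl⟩, by simp [hg]⟩

-- a set built over enumerate is a singleton-or-empty iff the indexed values all agree
lemma const_iff (cards : List Int) (f : Int × Int → Int) (g : Nat → Int)
    (hg : ∀ k, k < cards.length → f ((k : Int), gIdx cards k) = g k) :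
    ((PySem.Set.ofList ((PySem.List.enumerate cards).map fun ic => f ic)).length ≤ 1) ↔
      (∀ k, k < cards.length → ∀ l, l < cards.length → g k = g l) := by
  rw [setLen_le_one_iff]
  constructor
  · intro h k hk l hl
    have hk' := (mem_map_enumerate_iff cards f (g k)).mpr ⟨k, hk, (hg k hk).symm⟩
    have hl' := (mem_map_enumerate_iff cards f (g l)).mpr ⟨l, hl, (hg l hl).symm⟩
    exact h _ hk' _ hl'
  · intro h a ha b hb
    rcases (mem_map_enumerate_iff cards f a).mp ha with ⟨k, hk, rfl⟩
    rcases (mem_map_enumerate_iff cards f b).mp hb with ⟨l, hl, rfl⟩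
    rw [hg k hk, hg l hl]
    exact h k hk l hl

-- the interior-range check of B, index form
lemma dropLast_all_iff (cards : List Int) :
    ((cards.dropLast.all fun c => decide (1 ≤ c) && decide (c ≤ 52)) = true) ↔
      ∀ i : Nat, i + 1 < cards.length → 1 ≤ gIdx cards i ∧ gIdx cards i ≤ 52 := by
  rw [List.all_eq_true]
  constructor
  · intro h i hi
    have hi' : i < cards.dropLast.length := by simp [List.length_dropLast]; omega
    have := h _ (List.getElem_mem hi')
    simp only [Bool.and_eq_true, decide_eq_true_eq] at this
    have hg : cards.dropLast[i] = gIdx cards i := by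
      rw [List.getElem_dropLast, gIdx, List.getD_eq_getElem cards 0 (by omega)]
    rw [hg] at this
    exact this
  · intro h c hc
    rcases List.mem_iff_getElem.mp hc with ⟨i, hi, rfl⟩
    have hlen : i + 1 < cards.length := by
      have := hi; simp [List.length_dropLast] at this; omega
    have hg : cards.dropLast[i] = gIdx cards i := by
      rw [List.getElem_dropLast, gIdx, List.getD_eq_getElem cards 0 (by omega)]
    rw [hg]
    simp only [Bool.and_eq_true, decide_eq_true_eq]
    exact h i hlen

-- A's pairwise fitting is exactly B's three global invariants
lemma fitall_iff (cards : List Int) :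
    (∀ i : Nat, i + 1 < cards.length → fit_two (gIdx cards (i + 1)) (gIdx cards i) = true) ↔
      ((∀ i : Nat, i + 1 < cards.length → 1 ≤ gIdx cards i ∧ gIdx cards i ≤ 52) ∧
       (∀ k, k < cards.length → ∀ l, l < cards.length → Rf cards k = Rf cards l) ∧
       (∀ k, k < cards.length → ∀ l, l < cards.length → Cf cards k = Cf cards l)) := by
  rw [allpairs_iff_adjacent (Rf cards), allpairs_iff_adjacent (Cf cards)]
  constructor
  · intro h
    have hRange : ∀ i : Nat, i + 1 < cards.length → 1 ≤ gIdx cards i ∧ gIdx cards i ≤ 52 := by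
      intro i hi
      have := (fit_two_iff _ _).mp (h i hi)
      exact ⟨this.1.1, by omega⟩
    refine ⟨hRange, ?_, ?_⟩
    · intro i hi
      have hf := (fit_two_iff _ _).mp (h i hi)
      have hr := (rank_arith (gIdx cards (i + 1)) (gIdx cards i) (i : Int)).mp hf.2.1
      simp only [Rf]
      push_cast
      omega
    · intro i hi
      have hf := (fit_two_iff _ _).mp (h i hi)
      have hb := hRange i hi
      have hp := (parity_arith ((gIdx cards (i + 1) - 1) / 13) ((gIdx cards i - 1) / 13) (i : Int)
        (by omega) (by omega)).mp hf.2.2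
      simp only [Cf]
      push_cast
      omega
  · rintro ⟨hRange, hK, hC⟩ i hi
    have hb := hRange i hi
    apply (fit_two_iff _ _).mpr
    refine ⟨⟨hb.1, by omega⟩, ?_, ?_⟩
    · apply (rank_arith _ _ (i : Int)).mpr
      have := hK i hi
      simp only [Rf] at this
      push_cast at this
      omega
    · apply (parity_arith _ _ (i : Int) (by omega) (by omega)).mpr
      have := hC i hi
      simp only [Cf] at this
      push_cast at this
      omega

-- A unfolded: the guard plus the loop, in index form
lemma A_char (cards : List Int) :
    fit_together cards = true ↔
      cards.length ≠ 1 ∧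
        (∀ i : Nat, i + 1 < cards.length → fit_two (gIdx cards (i + 1)) (gIdx cards i) = true) := by
  by_cases h0 : cards.length = 0
  · rw [List.length_eq_zero_iff] at h0
    subst h0
    simp [fit_together, fitLoop]
  · by_cases h1 : cards.length = 1
    · simp [fit_together, h1]
    · unfold fit_together
      rw [if_neg (by simp; omega)]
      rw [fitLoop_iff cards (cards.length - 1) (by omega)]
      constructor
      · intro h
        exact ⟨h1, fun i hi => h i (by omega)⟩
      · intro h i hi
        exact h.2 i (by omega)

-- B unfolded: the guard, the range pass, and the two singleton-set tests, in index form
lemma B_char (cards : List Int) :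
    fit_together_alt cards = true ↔
      cards.length ≠ 1 ∧
        ((∀ i : Nat, i + 1 < cards.length → 1 ≤ gIdx cards i ∧ gIdx cards i ≤ 52) ∧
         (∀ k, k < cards.length → ∀ l, l < cards.length → Rf cards k = Rf cards l) ∧
         (∀ k, k < cards.length → ∀ l, l < cards.length → Cf cards k = Cf cards l)) := by
  have hgR : ∀ k, k < cards.length →
      PySem.Int.mod (gIdx cards k + (k : Int)) 13 = Rf cards k := by
    intro k _
    rw [PySem.Int.mod_eq_emod_of_pos (by norm_num), Rf]
  have hgC : ∀ k, k < cards.length →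
      PySem.Int.mod (PySem.Int.floordiv (gIdx cards k - 1) 13 + (k : Int)) 2 = Cf cards k := by
    intro k _
    rw [PySem.Int.floordiv_eq_ediv_of_pos (by norm_num),
      PySem.Int.mod_eq_emod_of_pos (by norm_num), Cf]
  by_cases h1 : cards.length = 1
  · simp [fit_together_alt, h1]
  · unfold fit_together_alt
    rw [if_neg (by simpa using h1), PySem.List.slice_to_neg_one]
    by_cases hR : (cards.dropLast.all fun c => decide (1 ≤ c) && decide (c ≤ 52)) = true
    · rw [hR]
      simp only [Bool.not_true, Bool.false_eq_true, if_false, Bool.and_eq_true,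
        decide_eq_true_eq]
      rw [const_iff cards _ (Rf cards) hgR, const_iff cards _ (Cf cards) hgC]
      constructor
      · intro h
        exact ⟨h1, (dropLast_all_iff cards).mp hR, h.1, h.2⟩
      · intro h
        exact ⟨h.2.2.1, h.2.2.2⟩
    · rw [Bool.not_eq_true] at hR
      rw [hR]
      simp only [Bool.not_false, if_true, Bool.false_eq_true, false_iff]
      intro h
      exact absurd ((dropLast_all_iff cards).mpr h.2.1) (by simp [hR])

-- ===== VERDICT (by name: the statement is the Claim_ definition above) =====
theorem fit_together_spec : Claim_equal_fit_together := by
  intro cards _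
  show fit_together cards = fit_together_alt cards
  refine Bool.eq_iff_iff.mpr ?_
  rw [A_char, B_char, fitall_iff]
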